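-- pv_equiv track=rewrite | github.com/OffGrid0xDAO/OffGrid-Scalp-Bot | archive/old_implementation/backup_before_deep_cleanup_20251020_154101/archive/scratches/optimal_vs_actual_analyzer.py | _get_intensity_signature
-- ===== SOURCE A (Python) =====
-- from typing import List, Dict, Tuple
--
-- def _get_intensity_signature(candle: Dict) -> str:
--     """Get EMA intensity signature"""
--     light_green, dark_green, light_red, dark_red = 0, 0, 0, 0
--
--     for i in range(5, 150, 5):
--         color_key = f'MMA{i}_color'
--         intensity_key = f'MMA{i}_intensity'
--
--         if color_key in candle and intensity_key in candle:
--             color = candle[color_key]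
--             intensity = candle[intensity_key]
--
--             if color == 'green':
--                 if intensity == 'light':
--                     light_green += 1
--                 elif intensity == 'dark':
--                     dark_green += 1
--             elif color == 'red':
--                 if intensity == 'light':
--                     light_red += 1
--                 elif intensity == 'dark':
--                     dark_red += 1
--
--     return f"LG{light_green}_DG{dark_green}_LR{light_red}_DR{dark_red}"
-- ===== SOURCE B (Python) =====
-- def _get_intensity_signature(candle):
--     """Get EMA intensity signature"""
--     # Inverted traversal: scan the candle's own items once per target pair,
--     # recognizing valid color keys via a precomputed color-key -> intensity-key map,
--     # instead of probing the 29 fixed key pairs with a nested branch tree.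
--     intensity_key_of = {f'MMA{i}_color': f'MMA{i}_intensity' for i in range(5, 150, 5)}
--     parts = []
--     for label, color, intensity in (('LG', 'green', 'light'), ('DG', 'green', 'dark'),
--                                     ('LR', 'red', 'light'), ('DR', 'red', 'dark')):
--         n = sum(1 for key, value in candle.items()
--                 if key in intensity_key_of and value == color
--                 and candle.get(intensity_key_of[key]) == intensity)
--         parts.append(f'{label}{n}')
--     return '_'.join(parts)
-- ===== Notes on version B (the rewrite author's own statement) =====
-- stated objective: alternative
-- what changed: Inverts the traversal: instead of probing the 29 fixed MMA key pairs with a nested color/intensity branch tree over four counters, B scans the candle's own items against a precomputed color-key -> intensity-key map and counts matches once per target (color, intensity) pair, joining the four parts at the end.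
import Mathlib
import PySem

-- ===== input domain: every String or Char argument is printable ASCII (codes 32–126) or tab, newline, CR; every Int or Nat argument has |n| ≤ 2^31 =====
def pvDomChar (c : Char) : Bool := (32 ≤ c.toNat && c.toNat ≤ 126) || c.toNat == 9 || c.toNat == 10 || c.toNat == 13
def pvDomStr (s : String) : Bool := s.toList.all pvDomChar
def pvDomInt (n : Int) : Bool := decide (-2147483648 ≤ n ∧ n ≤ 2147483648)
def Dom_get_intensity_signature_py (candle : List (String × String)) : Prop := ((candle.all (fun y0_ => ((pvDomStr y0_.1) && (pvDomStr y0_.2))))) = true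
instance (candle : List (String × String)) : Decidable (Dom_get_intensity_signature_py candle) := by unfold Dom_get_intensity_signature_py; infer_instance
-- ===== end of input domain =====

-- B inverts the traversal: instead of probing the 29 fixed key pairs with a nested
-- color/intensity branch tree and four counters, it scans the candle's own items against a
-- precomputed color-key -> intensity-key map, once per target pair (objective: alternative).

-- ===== PORT A =====
-- f'MMA{i}_color' / f'MMA{i}_intensity'
def pvColorKey (i : Int) : String := "MMA" ++ PySem.Int.toStr i ++ "_color"
def pvIntensityKey (i : Int) : String := "MMA" ++ PySem.Int.toStr i ++ "_intensity"

-- loop body of A: the 'color_key in candle and intensity_key in candle' guard (both lookups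
-- succeed) and the nested if/elif tree over the four counters
def pvStepA (d : PySem.Dict String String) (st : Int × Int × Int × Int) (i : Int) :
    Int × Int × Int × Int :=
  match d.get? (pvColorKey i), d.get? (pvIntensityKey i) with
  | some color, some intensity =>
      if color == "green" then
        if intensity == "light" then (st.1 + 1, st.2.1, st.2.2.1, st.2.2.2)
        else if intensity == "dark" then (st.1, st.2.1 + 1, st.2.2.1, st.2.2.2)
        else st
      else if color == "red" then
        if intensity == "light" then (st.1, st.2.1, st.2.2.1 + 1, st.2.2.2)
        else if intensity == "dark" then (st.1, st.2.1, st.2.2.1, st.2.2.2 + 1)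
        else st
      else st
  | _, _ => st

def get_intensity_signature_py (candle : List (String × String)) : String :=
  let d : PySem.Dict String String := PySem.Dict.mk candle
  let st := (PySem.List.pyRange 5 150 5).foldl (pvStepA d) (0, 0, 0, 0)
  "LG" ++ PySem.Int.toStr st.1 ++ "_DG" ++ PySem.Int.toStr st.2.1 ++
    "_LR" ++ PySem.Int.toStr st.2.2.1 ++ "_DR" ++ PySem.Int.toStr st.2.2.2

-- ===== PORT B =====
-- the dict comprehension {f'MMA{i}_color': f'MMA{i}_intensity' for i in range(5, 150, 5)}
def pvIKD : PySem.Dict String String :=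
  PySem.Dict.mk ((PySem.List.pyRange 5 150 5).map (fun i => (pvColorKey i, pvIntensityKey i)))

-- sum(1 for key, value in candle.items() if key in intensity_key_of and value == color
--     and candle.get(intensity_key_of[key]) == intensity)
def pvCountB (d : PySem.Dict String String) (color intensity : String) : Int :=
  d.items.foldl (fun n kv =>
    match pvIKD.get? kv.1 with
    | some ik => if kv.2 == color && d.get? ik == some intensity then n + 1 else n
    | none => n) 0

def get_intensity_signature_py_alt (candle : List (String × String)) : String :=
  let d : PySem.Dict String String := PySem.Dict.mk candle
  let parts := [("LG", "green", "light"), ("DG", "green", "dark"),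
                ("LR", "red", "light"), ("DR", "red", "dark")].foldl
      (fun ps t => ps ++ [t.1 ++ PySem.Int.toStr (pvCountB d t.2.1 t.2.2)]) ([] : List String)
  PySem.Str.join "_" parts

-- ===== PRECONDITION & SPEC =====
-- Pre_ excludes association lists with duplicate keys: they do not denote a Python dict
-- (the function's parameter is a dict, whose keys are unique).
def Pre_get_intensity_signature_py (candle : List (String × String)) : Prop :=
  (candle.map Prod.fst).Nodup
instance (candle : List (String × String)) : Decidable (Pre_get_intensity_signature_py candle) := by unfold Pre_get_intensity_signature_py; infer_instance

def pvWitness_get_intensity_signature_py : (List (String × String)) :=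
  [("MMA5_color", "green"), ("MMA5_intensity", "light")]

def Spec_get_intensity_signature_py (candle : List (String × String)) (out : String) : Prop := out = get_intensity_signature_py_alt candle
instance (candle : List (String × String)) (out : String) : Decidable (Spec_get_intensity_signature_py candle out) := by unfold Spec_get_intensity_signature_py; infer_instance

-- ===== CLAIM (what is proved, stated in full; the proofs are below) =====
def Claim_equal_get_intensity_signature_py : Prop := ∀ (candle : List (String × String)), Dom_get_intensity_signature_py candle → Pre_get_intensity_signature_py candle → Spec_get_intensity_signature_py candle (get_intensity_signature_py candle)

-- ===== LEMMAS AND PROOFS =====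

-- the count of i's in l on which A's branch for (c, t) fires
def pvCntA (d : PySem.Dict String String) (c t : String) (l : List Int) : Int :=
  (l.countP (fun i => d.get? (pvColorKey i) == some c && d.get? (pvIntensityKey i) == some t) : Int)

lemma pvFoldA (d : PySem.Dict String String) (l : List Int) (st : Int × Int × Int × Int) :
    l.foldl (pvStepA d) st
      = (st.1 + pvCntA d "green" "light" l, st.2.1 + pvCntA d "green" "dark" l,
         st.2.2.1 + pvCntA d "red" "light" l, st.2.2.2 + pvCntA d "red" "dark" l) := by
  induction l generalizing st with
  | nil => simp [pvCntA]
  | cons i l ih =>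
      simp only [List.foldl_cons, ih, pvCntA, List.countP_cons]
      rcases hc : d.get? (pvColorKey i) with _ | color <;>
        rcases hi : d.get? (pvIntensityKey i) with _ | intensity <;>
        simp [pvStepA, hc, hi, Prod.ext_iff] <;> try omega
      by_cases hg : color = "green" <;> by_cases hr : color = "red" <;>
          by_cases hl : intensity = "light" <;> by_cases hd : intensity = "dark" <;>
          simp_all <;> omega

lemma pvCountP_assoc {κ ν : Type} [DecidableEq κ] [DecidableEq ν]
    (L : List (κ × ν)) (hnd : (L.map Prod.fst).Nodup) (k : κ) (v : ν) :
    L.countP (fun kv => kv.2 == v && kv.1 == k) = if (k, v) ∈ L then 1 else 0 := by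
  induction L with
  | nil => simp
  | cons a L ih =>
      simp only [List.map_cons, List.nodup_cons] at hnd
      rcases a with ⟨ak, av⟩
      by_cases hk : k = ak
      · subst hk
        have hnot : (k, v) ∉ L := fun hm => hnd.1 (List.mem_map.mpr ⟨(k, v), hm, rfl⟩)
        have hz : L.countP (fun kv => kv.2 == v && kv.1 == k) = 0 := by
          rw [List.countP_eq_zero]
          intro kv hm
          simp only [Bool.and_eq_true, beq_iff_eq]
          rintro ⟨h2, h1⟩
          exact hnd.1 (List.mem_map.mpr ⟨kv, hm, h1⟩)
        by_cases hv : av = v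
        · simp [List.countP_cons, hz, hv, hnot, List.mem_cons]
        · have hv' : ¬v = av := fun h => hv h.symm
          simp [List.countP_cons, hz, hv, hnot, List.mem_cons, hv']
      · have hz : ((av == v) && (ak == k)) = false := by
          simp only [Bool.and_eq_false_iff, beq_eq_false_iff_ne]
          exact Or.inr fun h => hk h.symm
        simp [List.countP_cons, hz, ih hnd.2, List.mem_cons, Prod.ext_iff, hk]

lemma pvIKD_mem (pl : List Int) (x : String) (y : String)
    (h : (PySem.Dict.mk (pl.map (fun i => (pvColorKey i, pvIntensityKey i)))).get? x = some y) :
    x ∈ pl.map pvColorKey := by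
  induction pl with
  | nil => simp [PySem.Dict.get?] at h
  | cons i pl ih =>
      rw [List.map_cons, PySem.Dict.get?_mk_cons] at h
      by_cases he : pvColorKey i = x
      · simp [he]
      · simp only [beq_iff_eq, he, if_false] at h
        simp [ih h]

lemma pvCountP_ite {α : Type} (L : List α) (p q r : α → Bool) :
    L.countP (fun x => if p x then q x else r x)
      = L.countP (fun x => q x && p x) + L.countP (fun x => r x && !p x) := by
  induction L with
  | nil => rfl
  | cons a L ih =>
      by_cases h : p a = true <;> simp [List.countP_cons, h, ih] <;> omega

lemma pvCore (d : PySem.Dict String String) (hnd : d.keys.Nodup) (c t : String) :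
    ∀ (pl : List Int), (pl.map pvColorKey).Nodup →
    d.items.countP (fun kv =>
        match (PySem.Dict.mk (pl.map (fun i => (pvColorKey i, pvIntensityKey i)))).get? kv.1 with
        | some ik => kv.2 == c && d.get? ik == some t
        | none => false)
      = pl.countP (fun i => d.get? (pvColorKey i) == some c && d.get? (pvIntensityKey i) == some t) := by
  have hnd' : (d.items.map Prod.fst).Nodup := hnd
  intro pl
  induction pl with
  | nil =>
      intro _
      simp [PySem.Dict.get?]
  | cons i pl ih =>
      intro hpl
      simp only [List.map_cons, List.nodup_cons] at hpl
      have hstep : ∀ kv : String × String,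
          (match (PySem.Dict.mk ((pvColorKey i, pvIntensityKey i) ::
              pl.map (fun j => (pvColorKey j, pvIntensityKey j)))).get? kv.1 with
           | some ik => kv.2 == c && d.get? ik == some t
           | none => false)
          = (if (pvColorKey i == kv.1) then
              (kv.2 == c && d.get? (pvIntensityKey i) == some t)
            else
              (match (PySem.Dict.mk (pl.map (fun j => (pvColorKey j, pvIntensityKey j)))).get? kv.1 with
               | some ik => kv.2 == c && d.get? ik == some t
               | none => false)) := by
        intro kv
        rw [PySem.Dict.get?_mk_cons]
        by_cases h : (pvColorKey i == kv.1) = true <;> simp [h]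
      rw [List.map_cons]
      rw [List.countP_congr (fun kv _ => by rw [hstep kv])]
      rw [pvCountP_ite]
      have hsecond : d.items.countP (fun kv =>
          (match (PySem.Dict.mk (pl.map (fun j => (pvColorKey j, pvIntensityKey j)))).get? kv.1 with
           | some ik => kv.2 == c && d.get? ik == some t
           | none => false) && !(pvColorKey i == kv.1))
          = d.items.countP (fun kv =>
          (match (PySem.Dict.mk (pl.map (fun j => (pvColorKey j, pvIntensityKey j)))).get? kv.1 with
           | some ik => kv.2 == c && d.get? ik == some t
           | none => false)) := by
        apply List.countP_congr
        intro kv _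
        rcases hg : (PySem.Dict.mk (pl.map (fun j => (pvColorKey j, pvIntensityKey j)))).get? kv.1 with _ | ik
        · simp
        · have hx : kv.1 ∈ pl.map pvColorKey := pvIKD_mem pl kv.1 ik hg
          have hne : (pvColorKey i == kv.1) = false := by
            rw [beq_eq_false_iff_ne]
            intro he; exact hpl.1 (he ▸ hx)
          simp [hne]
      rw [hsecond, ih hpl.2, List.countP_cons]
      have hfirst : d.items.countP (fun kv =>
          (kv.2 == c && d.get? (pvIntensityKey i) == some t) && (pvColorKey i == kv.1))
          = if (d.get? (pvColorKey i) == some c && d.get? (pvIntensityKey i) == some t) then 1 else 0 := by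
        have hcong : d.items.countP (fun kv =>
            (kv.2 == c && d.get? (pvIntensityKey i) == some t) && (pvColorKey i == kv.1))
            = d.items.countP (fun kv =>
            (kv.2 == c && kv.1 == pvColorKey i) && (d.get? (pvIntensityKey i) == some t)) := by
          apply List.countP_congr
          intro kv _
          constructor <;>
            · simp only [Bool.and_eq_true, beq_iff_eq]
              rintro ⟨⟨h1, h2⟩, h3⟩
              first
                | exact ⟨⟨h1, h3.symm⟩, h2⟩
                | exact ⟨⟨h1, h3⟩, h2.symm⟩
        rw [hcong]
        rcases hQ : (d.get? (pvIntensityKey i) == some t) with _ | _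
        · simp
        · simp only [Bool.and_true]
          rw [pvCountP_assoc d.items hnd' (pvColorKey i) c]
          by_cases hm : (pvColorKey i, c) ∈ d.items
          · have h2 := (PySem.Dict.get?_eq_some_iff_mem_items d (pvColorKey i) c hnd).mpr hm
            simp [hm, h2]
          · have h2 : ¬ d.get? (pvColorKey i) = some c := fun h =>
              hm ((PySem.Dict.get?_eq_some_iff_mem_items d (pvColorKey i) c hnd).mp h)
            simp [hm, h2]
      rw [hfirst]
      omega

lemma pvRngNodup : ((PySem.List.pyRange 5 150 5).map pvColorKey).Nodup := by decide

lemma pvCountB_eq (d : PySem.Dict String String) (hnd : d.keys.Nodup) (c t : String) :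
    pvCountB d c t = pvCntA d c t (PySem.List.pyRange 5 150 5) := by
  have hb : pvCountB d c t = d.items.foldl (fun n kv =>
      if (match pvIKD.get? kv.1 with
          | some ik => kv.2 == c && d.get? ik == some t
          | none => false) then n + 1 else n) 0 := by
    unfold pvCountB
    apply PySem.List.foldl_congr_mem
    intro n kv _
    rcases pvIKD.get? kv.1 with _ | ik <;> simp
  rw [hb, PySem.List.foldl_if_add_one, zero_add]
  unfold pvCntA
  exact congrArg _ (pvCore d hnd c t (PySem.List.pyRange 5 150 5) pvRngNodup)

-- ===== VERDICT (by name: the statement is the Claim_ definition above) =====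
theorem get_intensity_signature_py_spec : Claim_equal_get_intensity_signature_py := by
  intro candle _ hpre
  unfold Spec_get_intensity_signature_py get_intensity_signature_py get_intensity_signature_py_alt
  have hnd : (PySem.Dict.mk candle).keys.Nodup := hpre
  simp only [List.foldl_cons, List.foldl_nil, List.nil_append, List.append_nil, pvFoldA,
    pvCountB_eq (PySem.Dict.mk candle) hnd, zero_add]
  apply String.ext
  simp [String.toList_append, PySem.Chars.join, List.intercalate]
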